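-- pv_equiv track=rewrite | github.com/jaewilson07/rag_mongodb | sample/docling/chunk_pydantic_sample.py | subset_markdown_by_headings
-- ===== SOURCE A (Python) =====
-- def subset_markdown_by_headings(
--     markdown: str,
--     max_chars: int = 20000,
--     max_sections: int = 8,
-- ) -> str:
--     """Keep title + first N heading sections until max_chars is reached."""
--     if not markdown.strip():
--         return markdown
--
--     lines = markdown.splitlines()
--     sections: list[list[str]] = []
--     current: list[str] = []
--
--     for line in lines:
--         is_heading = line.startswith("#")
--         if is_heading and current:
--             sections.append(current)
--             current = [line]
--         else:
--             if not current and line.strip():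
--                 current = [line]
--             elif current:
--                 current.append(line)
--
--     if current:
--         sections.append(current)
--
--     # Always include the first section (typically title/introduction)
--     output_lines: list[str] = []
--     total_chars = 0
--     added_sections = 0
--
--     for section in sections:
--         section_text = "\n".join(section).strip()
--         if not section_text:
--             continue
--         projected = total_chars + len(section_text) + 2
--         if output_lines and (projected > max_chars or added_sections >= max_sections):
--             break
--         output_lines.append(section_text)
--         total_chars = projected
--         added_sections += 1
--
--     return "\n\n".join(output_lines).strip()
-- ===== SOURCE B (Python) =====
-- def subset_markdown_by_headings(
--     markdown: str,
--     max_chars: int = 20000,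
--     max_sections: int = 8,
-- ) -> str:
--     """Single pass over lines: maintain the current section buffer and the
--     running output/char/section counters, flushing a section as soon as a
--     heading closes it (and once more for the trailing buffer)."""
--     if not markdown.strip():
--         return markdown
--
--     output: list[str] = []
--     total = 0
--     added = 0
--     current: list[str] = []
--
--     def flush() -> bool:
--         nonlocal total, added
--         text = "\n".join(current).strip()
--         if not text:
--             return True
--         projected = total + len(text) + 2
--         if output and (projected > max_chars or added >= max_sections):
--             return False
--         output.append(text)
--         total = projected
--         added += 1
--         return True
--
--     for line in markdown.splitlines():
--         if line.startswith("#") and current: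
--             if not flush():
--                 break
--             current = [line]
--         elif current:
--             current.append(line)
--         elif line.strip():
--             current = [line]
--     else:
--         flush()
--
--     return "\n\n".join(output).strip()
-- ===== Notes on version B (the rewrite author's own statement) =====
-- stated objective: alternative
-- what changed: Replaced A's two-phase structure (build the full list of sections, then fold over it with a break) by a single pass over the lines that flushes each section into the output the moment a heading closes it, maintaining the running char/section counters and never materialising the list of sections.
import Mathlib
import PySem

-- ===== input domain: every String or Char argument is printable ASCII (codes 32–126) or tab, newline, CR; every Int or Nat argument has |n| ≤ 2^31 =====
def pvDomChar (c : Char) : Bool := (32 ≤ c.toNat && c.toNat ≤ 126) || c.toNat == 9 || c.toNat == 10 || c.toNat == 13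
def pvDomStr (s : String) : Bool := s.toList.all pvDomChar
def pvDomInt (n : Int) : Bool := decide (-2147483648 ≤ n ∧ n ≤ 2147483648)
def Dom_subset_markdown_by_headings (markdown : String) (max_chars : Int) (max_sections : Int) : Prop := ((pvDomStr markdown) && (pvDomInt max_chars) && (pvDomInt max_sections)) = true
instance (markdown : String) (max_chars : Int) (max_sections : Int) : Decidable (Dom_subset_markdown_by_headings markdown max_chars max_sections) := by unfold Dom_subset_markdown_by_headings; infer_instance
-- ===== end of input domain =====

-- B replaces A's parse-all-sections-then-fold structure by a single pass over the lines
-- that flushes each section as soon as a heading closes it (objective: alternative).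

-- ===== PORT A =====
-- first for-loop of A: group the lines into sections (state: sections so far, current buffer)
def pvA_phase1 : List String → List (List String) → List String → List (List String) × List String
  | [], secs, cur => (secs, cur)
  | l :: rest, secs, cur =>
    if PySem.Str.startswith l "#" = true ∧ cur ≠ [] then
      pvA_phase1 rest (secs ++ [cur]) [l]
    else if cur = [] ∧ PySem.Str.strip l ≠ "" then
      pvA_phase1 rest secs [l]
    else if cur ≠ [] then
      pvA_phase1 rest secs (cur ++ [l])
    else
      pvA_phase1 rest secs cur

-- second for-loop of A: fold over the sections, with the break rendered as stopping recursion
def pvA_phase2 (mc ms : Int) : List (List String) → List String → Int → Int → List String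
  | [], out, _, _ => out
  | s :: rest, out, total, added =>
    let t := PySem.Str.strip (PySem.Str.join "\n" s)
    if t = "" then pvA_phase2 mc ms rest out total added
    else
      let proj := total + PySem.Str.len t + 2
      if out ≠ [] ∧ (proj > mc ∨ added ≥ ms) then out
      else pvA_phase2 mc ms rest (out ++ [t]) proj (added + 1)

def subset_markdown_by_headings (markdown : String) (max_chars : Int) (max_sections : Int) : String :=
  if PySem.Str.strip markdown = "" then markdown
  else
    let lines := PySem.Str.splitlines markdown
    let p := pvA_phase1 lines [] []
    let sections := p.1 ++ (if p.2 = [] then [] else [p.2])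
    PySem.Str.strip (PySem.Str.join "\n\n" (pvA_phase2 max_chars max_sections sections [] 0 0))

-- ===== PORT B =====
-- B's flush(): join+strip the current buffer and try to add it; none = stop (break)
def pvB_flush (mc ms : Int) (cur out : List String) (total added : Int) :
    Option (List String × Int × Int) :=
  let t := PySem.Str.strip (PySem.Str.join "\n" cur)
  if t = "" then some (out, total, added)
  else
    let proj := total + PySem.Str.len t + 2
    if out ≠ [] ∧ (proj > mc ∨ added ≥ ms) then none
    else some (out ++ [t], proj, added + 1)

-- B's single pass over the lines (final flush when the lines run out)
def pvB_loop (mc ms : Int) : List String → List String → List String → Int → Int → List String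
  | [], cur, out, total, added =>
    match pvB_flush mc ms cur out total added with
    | none => out
    | some (o, _, _) => o
  | l :: rest, cur, out, total, added =>
    if PySem.Str.startswith l "#" = true ∧ cur ≠ [] then
      match pvB_flush mc ms cur out total added with
      | none => out
      | some (o, tc, ad) => pvB_loop mc ms rest [l] o tc ad
    else if cur ≠ [] then pvB_loop mc ms rest (cur ++ [l]) out total added
    else if PySem.Str.strip l ≠ "" then pvB_loop mc ms rest [l] out total added
    else pvB_loop mc ms rest [] out total added

def subset_markdown_by_headings_alt (markdown : String) (max_chars : Int) (max_sections : Int) : String :=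
  if PySem.Str.strip markdown = "" then markdown
  else
    PySem.Str.strip (PySem.Str.join "\n\n"
      (pvB_loop max_chars max_sections (PySem.Str.splitlines markdown) [] [] 0 0))

-- ===== PRECONDITION & SPEC =====
def Spec_subset_markdown_by_headings (markdown : String) (max_chars : Int) (max_sections : Int) (out : String) : Prop := out = subset_markdown_by_headings_alt markdown max_chars max_sections
instance (markdown : String) (max_chars : Int) (max_sections : Int) (out : String) : Decidable (Spec_subset_markdown_by_headings markdown max_chars max_sections out) := by unfold Spec_subset_markdown_by_headings; infer_instance

-- ===== CLAIM (what is proved, stated in full; the proofs are below) =====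
def Claim_equal_subset_markdown_by_headings : Prop := ∀ (markdown : String) (max_chars : Int) (max_sections : Int), Dom_subset_markdown_by_headings markdown max_chars max_sections → Spec_subset_markdown_by_headings markdown max_chars max_sections (subset_markdown_by_headings markdown max_chars max_sections)

-- ===== LEMMAS AND PROOFS =====

-- phase1's sections accumulator is write-only: it can be pulled out front
theorem pvA_phase1_append (lines : List String) (secs : List (List String)) (cur : List String) :
    pvA_phase1 lines secs cur =
      (secs ++ (pvA_phase1 lines [] cur).1, (pvA_phase1 lines [] cur).2) := by
  induction lines generalizing secs cur with
  | nil => simp [pvA_phase1]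
  | cons l rest ih =>
    simp only [pvA_phase1]
    split_ifs with h1 h2 h3
    · simp only [List.nil_append]
      rw [ih (secs ++ [cur]) [l], ih [cur] [l]]; simp
    · exact ih secs [l]
    · exact ih secs (cur ++ [l])
    · exact ih secs cur

-- the sections A's phase1 produces from the remaining lines and current buffer
def pvSections (lines cur : List String) : List (List String) :=
  (pvA_phase1 lines [] cur).1 ++ (if (pvA_phase1 lines [] cur).2 = [] then [] else [(pvA_phase1 lines [] cur).2])

-- the heart of the equivalence: A's fold over the parsed sections equals B's single pass
theorem pvLoop_eq (mc ms : Int) (lines : List String) :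
    ∀ (cur out : List String) (total added : Int),
      pvA_phase2 mc ms (pvSections lines cur) out total added =
        pvB_loop mc ms lines cur out total added := by
  induction lines with
  | nil =>
    intro cur out total added
    by_cases hc : cur = []
    · subst hc
      have h0 : PySem.Str.strip (PySem.Str.join "\n" ([] : List String)) = "" := by decide
      have hf : pvB_flush mc ms [] out total added = some (out, total, added) := by
        simp [pvB_flush, h0]
      simp [pvSections, pvA_phase1, pvA_phase2, pvB_loop, hf]
    · simp only [pvSections, pvA_phase1, if_neg hc, List.nil_append]
      simp only [pvA_phase2, pvB_loop, pvB_flush]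
      split_ifs <;> simp [pvA_phase2]
  | cons l rest ih =>
    intro cur out total added
    by_cases h1 : PySem.Str.startswith l "#" = true ∧ cur ≠ []
    · have hsec : pvSections (l :: rest) cur = cur :: pvSections rest [l] := by
        simp only [pvSections]
        rw [pvA_phase1, if_pos h1]
        simp only [List.nil_append]
        rw [pvA_phase1_append rest [cur] [l]]
        simp
      rw [hsec]
      simp only [pvA_phase2, pvB_loop, if_pos h1, pvB_flush]
      split_ifs with ht hb
      · exact ih [l] out total added
      · rfl
      · exact ih [l] (out ++ [PySem.Str.strip (PySem.Str.join "\n" cur)]) _ (added + 1)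
    · by_cases h3 : cur ≠ []
      · have h2 : ¬ (cur = [] ∧ PySem.Str.strip l ≠ "") := fun h => h3 h.1
        have hsec : pvSections (l :: rest) cur = pvSections rest (cur ++ [l]) := by
          simp only [pvSections]
          rw [pvA_phase1, if_neg h1, if_neg h2, if_pos h3]
        rw [hsec]
        simp only [pvB_loop, if_neg h1, if_pos h3]
        exact ih (cur ++ [l]) out total added
      · have hc : cur = [] := by simpa using h3
        subst hc
        by_cases hl : PySem.Str.strip l ≠ ""
        · have hsec : pvSections (l :: rest) ([] : List String) = pvSections rest [l] := by
            simp only [pvSections]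
            rw [pvA_phase1, if_neg h1, if_pos ⟨rfl, hl⟩]
          rw [hsec]
          simp only [pvB_loop]
          rw [if_neg h1, if_neg h3, if_pos hl]
          exact ih [l] out total added
        · have h2 : ¬ (([] : List String) = [] ∧ PySem.Str.strip l ≠ "") := fun h => hl h.2
          have hsec : pvSections (l :: rest) ([] : List String) = pvSections rest [] := by
            simp only [pvSections]
            rw [pvA_phase1, if_neg h1, if_neg h2, if_neg h3]
          rw [hsec]
          simp only [pvB_loop]
          rw [if_neg h1, if_neg h3, if_neg hl]
          exact ih [] out total added

-- ===== VERDICT (by name: the statement is the Claim_ definition above) =====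
theorem subset_markdown_by_headings_spec : Claim_equal_subset_markdown_by_headings := by
  intro markdown mc ms _
  unfold Spec_subset_markdown_by_headings
  unfold subset_markdown_by_headings subset_markdown_by_headings_alt
  by_cases h : PySem.Str.strip markdown = ""
  · simp [h]
  · simp only [if_neg h]
    rw [← pvLoop_eq mc ms (PySem.Str.splitlines markdown) [] [] 0 0]
    rfl
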